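-- pv_equiv track=rewrite | github.com/mattphotonman/yahtzee_optimize | widget.py | iter_possible_rolls
-- ===== SOURCE A (Python) =====
-- from typing import Generator
--
-- Roll = tuple[int, ...]
--
-- def iter_possible_rolls(num_dice: int, num_faces: int) -> Generator[Roll, None, None]:
--     if num_dice == 0:
--         yield ()
--         return
--
--     roll = [1 for _ in range(num_dice)]
--     yield tuple(roll)
--     while any(face_value != num_faces for face_value in roll):
--         for idx_to_increment, face_value in reversed(list(enumerate(roll))):
--             if face_value != num_faces:
--                 break
--         else:
--             assert False, "Logic error"
--         roll[idx_to_increment] = face_value + 1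
--         for idx in range(idx_to_increment + 1, len(roll)):
--             roll[idx] = roll[idx_to_increment]
--
--         yield tuple(roll)
-- ===== SOURCE B (Python) =====
-- from typing import Generator
--
-- Roll = tuple[int, ...]
--
-- def iter_possible_rolls(num_dice: int, num_faces: int) -> Generator[Roll, None, None]:
--     def gen(lo: int, m: int) -> Generator[Roll, None, None]:
--         # non-decreasing rolls of m dice with faces >= lo, in lexicographic order,
--         # emitted run by run: k copies of the smallest face v, then the rest
--         if m <= 0:
--             yield ()
--             return
--         for v in range(lo, num_faces + 1):
--             for k in range(m, 0, -1):
--                 for rest in gen(v + 1, m - k):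
--                     yield (v,) * k + rest
--     yield from gen(1, num_dice)
-- ===== Notes on version B (the rewrite author's own statement) =====
-- stated objective: alternative
-- what changed: Replaces the imperative in-place successor scan (find last non-max face, increment, reset suffix, re-checking any() each round) with a recursive generator over (minimum face, remaining dice) that emits each roll as a run of k copies of the smallest face followed by a recursively generated rest, in the same lexicographic order.
import Mathlib
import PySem

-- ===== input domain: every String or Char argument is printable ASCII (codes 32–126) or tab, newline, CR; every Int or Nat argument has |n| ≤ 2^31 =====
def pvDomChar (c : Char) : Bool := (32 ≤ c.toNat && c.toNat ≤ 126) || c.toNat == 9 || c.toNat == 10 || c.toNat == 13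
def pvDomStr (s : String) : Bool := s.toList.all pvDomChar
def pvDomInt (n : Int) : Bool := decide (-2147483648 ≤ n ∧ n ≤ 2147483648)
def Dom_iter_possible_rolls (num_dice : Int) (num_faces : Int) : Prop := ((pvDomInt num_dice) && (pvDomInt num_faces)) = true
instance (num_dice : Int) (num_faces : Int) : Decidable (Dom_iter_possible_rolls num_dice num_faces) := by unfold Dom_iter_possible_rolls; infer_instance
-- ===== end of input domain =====

-- B replaces A's imperative in-place successor scan by a recursive run-length generator (k copies of the smallest face, then the recursively generated rest); same rolls, same lexicographic order (objective: alternative).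

-- ===== PORT A =====
-- one iteration of A's while-body: find the last index whose face ≠ num_faces,
-- increment it, and overwrite the suffix with that value (exact transliteration;
-- enumerate indices are nonnegative so .toNat is exact; Python re-reads
-- roll[idx_to_increment] in the inner loop, which is face + 1 after the assignment)
def pvStepA (num_faces : Int) (roll : List Int) : List Int :=
  match ((PySem.List.enumerate roll 0).reverse).find? (fun p => p.2 != num_faces) with
  | none => []  -- Python: assert False, "Logic error" (unreachable while the while-condition holds)
  | some (idx, face) =>
      let roll1 := roll.set idx.toNat (face + 1)
      (PySem.List.pyRange (idx + 1) (roll.length : Int) 1).foldl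
        (fun acc j => acc.set j.toNat (face + 1)) roll1

-- A's while-loop; fuel only makes the recursion total (one unit per emitted roll)
def pvLoopA (num_faces : Int) : Nat → List Int → List (List Int)
  | 0, _ => []
  | fuel + 1, roll =>
      if roll.any (fun v => v != num_faces) then
        let roll' := pvStepA num_faces roll
        roll' :: pvLoopA num_faces fuel roll'
      else []

def iter_possible_rolls (num_dice : Int) (num_faces : Int) : List (List Int) :=
  if num_dice == 0 then [[]]
  else
    let roll := List.replicate num_dice.toNat 1   -- [1 for _ in range(num_dice)]
    roll :: pvLoopA num_faces ((num_faces.toNat + 1) ^ num_dice.toNat) roll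

-- ===== PORT B =====
-- gen(lo, m): for v in range(lo, num_faces+1), k in range(m, 0, -1):
--   yield (v,)*k + rest for rest in gen(v+1, m-k); base m <= 0 yields ()
-- (.attach only carries the k-membership fact needed for termination)
def pvGenB2 (num_faces : Int) : Int → Nat → List (List Int)
  | _, 0 => [[]]
  | lo, m + 1 =>
    (PySem.List.pyRange lo (num_faces + 1) 1).flatMap (fun v =>
      (PySem.List.pyRange ((m : Int) + 1) 0 (-1)).attach.flatMap (fun k =>
        (pvGenB2 num_faces (v + 1) (m + 1 - k.1.toNat)).map
          (fun rest => List.replicate k.1.toNat v ++ rest)))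
  termination_by _ m => m
  decreasing_by
    have := (PySem.List.mem_pyRange_neg_one.mp k.2)
    omega

def iter_possible_rolls_alt (num_dice : Int) (num_faces : Int) : List (List Int) :=
  pvGenB2 num_faces 1 num_dice.toNat

-- ===== PRECONDITION & SPEC =====
-- Pre_ excludes num_dice ≥ 1 with num_faces < 1: there Python A never returns (its
-- while-loop keeps incrementing faces that can never reach num_faces).
def Pre_iter_possible_rolls (num_dice : Int) (num_faces : Int) : Prop :=
  0 < num_dice → 1 ≤ num_faces
instance (num_dice : Int) (num_faces : Int) : Decidable (Pre_iter_possible_rolls num_dice num_faces) := by unfold Pre_iter_possible_rolls; infer_instance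
def pvWitness_iter_possible_rolls : Int × Int := (2, 3)
def Spec_iter_possible_rolls (num_dice : Int) (num_faces : Int) (out : List (List Int)) : Prop := out = iter_possible_rolls_alt num_dice num_faces
instance (num_dice : Int) (num_faces : Int) (out : List (List Int)) : Decidable (Spec_iter_possible_rolls num_dice num_faces out) := by unfold Spec_iter_possible_rolls; infer_instance

-- ===== CLAIM (what is proved, stated in full; the proofs are below) =====
def Claim_equal_iter_possible_rolls : Prop := ∀ (num_dice : Int) (num_faces : Int), Dom_iter_possible_rolls num_dice num_faces → Pre_iter_possible_rolls num_dice num_faces → Spec_iter_possible_rolls num_dice num_faces (iter_possible_rolls num_dice num_faces)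

-- ===== LEMMAS AND PROOFS =====

-- residual fuel of A's loop: none if the loop does not finish within the fuel,
-- some (fuel left) if it does (proof-side mirror of pvLoopA)
def pvRem (f : Int) : Nat → List Int → Option Nat
  | 0, r => if r.any (fun v => v != f) then none else some 0
  | fuel + 1, r => if r.any (fun v => v != f) then pvRem f fuel (pvStepA f r) else some (fuel + 1)

theorem pvTakeSet (acc : List Int) (m : Nat) (c : Int) (h : m < acc.length) :
    (acc.set m c).take (m + 1) = acc.take m ++ [c] := by
  rw [List.set_eq_take_append_cons_drop, if_pos h, List.take_append]
  simp [List.length_take, Nat.min_eq_left (Nat.le_of_lt h)]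

-- writing c into positions a, a+1, …, length-1
theorem pvFoldSet (c : Int) : ∀ (k : Nat) (acc : List Int) (a : Int), 0 ≤ a → acc.length - a.toNat = k →
    (PySem.List.pyRange a (acc.length : Int) 1).foldl (fun x j => x.set j.toNat c) acc
      = acc.take a.toNat ++ List.replicate (acc.length - a.toNat) c := by
  intro k
  induction k with
  | zero =>
    intro acc a ha hk
    have hle : (acc.length : Int) ≤ a := by omega
    rw [PySem.List.pyRange_one_eq_nil hle]
    simp [List.take_of_length_le (by omega : acc.length ≤ a.toNat), hk]
  | succ k ih =>
    intro acc a ha hk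
    have hlt : a < (acc.length : Int) := by omega
    rw [PySem.List.pyRange_one_cons hlt, List.foldl_cons]
    have hlen : (acc.set a.toNat c).length = acc.length := by simp
    have hrec := ih (acc.set a.toNat c) (a + 1) (by omega) (by rw [hlen]; omega)
    rw [hlen] at hrec
    rw [hrec]
    have hnat : (a + 1).toNat = a.toNat + 1 := by omega
    rw [hnat, pvTakeSet acc a.toNat c (by omega)]
    have h1 : acc.length - a.toNat = (acc.length - (a.toNat + 1)) + 1 := by omega
    rw [h1, List.append_assoc]
    congr 1

theorem pvEnumShift : ∀ (r : List Int) (s : Int),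
    PySem.List.enumerate r (s + 1) = (PySem.List.enumerate r s).map (fun p => (p.1 + 1, p.2)) := by
  intro r
  induction r with
  | nil => intro s; simp [PySem.List.enumerate_nil]
  | cons x t ih =>
    intro s
    rw [PySem.List.enumerate_cons, PySem.List.enumerate_cons, ih (s + 1)]
    simp

theorem pvFindCons (f v : Int) (r : List Int) :
    ((PySem.List.enumerate (v :: r) 0).reverse).find? (fun p => p.2 != f)
      = (((PySem.List.enumerate r 0).reverse.find? (fun p : Int × Int => p.2 != f)).map
           (fun p => (p.1 + 1, p.2))).or (if (v != f) = true then some ((0 : Int), v) else none) := by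
  rw [PySem.List.enumerate_cons]
  rw [show (0 : Int) + 1 = 1 by norm_num, show (1 : Int) = 0 + 1 by norm_num, pvEnumShift r 0]
  rw [List.reverse_cons, List.find?_append, ← List.map_reverse, List.find?_map]
  have h1 : ((fun p : Int × Int => p.2 != f) ∘ (fun p : Int × Int => (p.1 + 1, p.2)))
      = (fun p : Int × Int => p.2 != f) := by funext p; rfl
  rw [h1]
  congr 1
  simp only [List.find?]
  split <;> simp_all

theorem pvFindSome (f : Int) (r : List Int) (hc : r.any (fun v => v != f) = true) :
    ∃ (k : Nat) (x : Int), ((PySem.List.enumerate r 0).reverse).find? (fun p => p.2 != f)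
      = some ((k : Int), x) ∧ k < r.length ∧ r[k]? = some x ∧ (x != f) = true := by
  have hex : ∃ p ∈ (PySem.List.enumerate r 0).reverse, (fun p : Int × Int => p.2 != f) p = true := by
    obtain ⟨y, hy, hyf⟩ := List.any_eq_true.1 hc
    obtain ⟨k, hk, hk2⟩ := List.getElem_of_mem hy
    refine ⟨((0 : Int) + k, y), ?_, hyf⟩
    rw [List.mem_reverse]
    exact (PySem.List.mem_enumerate_iff r 0 _).2 ⟨k, hk, by rw [← hk2]⟩
  obtain ⟨q, hfind⟩ := Option.isSome_iff_exists.1 (List.find?_isSome.2 hex)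
  obtain ⟨idx, face⟩ := q
  have hp := List.find?_some (p := fun p : Int × Int => p.2 != f) hfind
  have hmem : (idx, face) ∈ (PySem.List.enumerate r 0).reverse := List.mem_of_find?_eq_some hfind
  rw [List.mem_reverse] at hmem
  obtain ⟨k, hk, hke⟩ := (PySem.List.mem_enumerate_iff r 0 _).1 hmem
  have hidx : idx = (k : Int) := by simpa using congrArg Prod.fst hke
  have hface : face = r[k] := congrArg Prod.snd hke
  exact ⟨k, face, by rw [← hidx]; exact hfind, hk,
    by rw [List.getElem?_eq_getElem hk, hface], by simpa using hp⟩

-- characterization of one step: some position i holds a non-max face x, and the step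
-- yields take i ++ replicate (x+1)
theorem pvStepA_char (f : Int) (r : List Int) (hc : r.any (fun v => v != f) = true) :
    ∃ (i : Nat) (x : Int), i < r.length ∧ r[i]? = some x ∧ (x != f) = true ∧
      pvStepA f r = r.take i ++ List.replicate (r.length - i) (x + 1) := by
  obtain ⟨k, x, hfind, hk, hget, hx⟩ := pvFindSome f r hc
  refine ⟨k, x, hk, hget, hx, ?_⟩
  unfold pvStepA
  rw [hfind]
  simp only
  have hlen1 : (r.set (k : Int).toNat (x + 1)).length = r.length := by simp
  have hF := pvFoldSet (x + 1) ((r.set (k : Int).toNat (x + 1)).length - ((k : Int) + 1).toNat)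
      (r.set (k : Int).toNat (x + 1)) ((k : Int) + 1) (by omega) rfl
  rw [hlen1] at hF
  rw [hF]
  have htn : ((k : Int) + 1).toNat = k + 1 := by omega
  have hin : ((k : Int)).toNat = k := by omega
  rw [htn, hin, pvTakeSet r k (x + 1) hk]
  have h1 : r.length - k = (r.length - (k + 1)) + 1 := by omega
  rw [h1, List.append_assoc]
  congr 1

theorem pvStepA_cons (f v : Int) (r : List Int) (hc : r.any (fun v => v != f) = true) :
    pvStepA f (v :: r) = v :: pvStepA f r := by
  obtain ⟨k, x, hfind, hk, -, -⟩ := pvFindSome f r hc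
  unfold pvStepA
  rw [pvFindCons, hfind]
  simp only [Option.map_some, Option.some_or]
  have hlenL : ((v :: r).set ((k : Int) + 1).toNat (x + 1)).length = r.length + 1 := by simp
  have hL := pvFoldSet (x + 1) (((v :: r).set ((k : Int) + 1).toNat (x + 1)).length - ((k : Int) + 1 + 1).toNat)
      ((v :: r).set ((k : Int) + 1).toNat (x + 1)) ((k : Int) + 1 + 1) (by omega) rfl
  have hR := pvFoldSet (x + 1) ((r.set (k : Int).toNat (x + 1)).length - ((k : Int) + 1).toNat)
      (r.set (k : Int).toNat (x + 1)) ((k : Int) + 1) (by omega) rfl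
  simp only [hlenL] at hL
  simp only [List.length_set] at hR
  simp only [List.length_cons]
  rw [hL, hR]
  have h1 : ((k : Int) + 1 + 1).toNat = k + 2 := by omega
  have h2 : ((k : Int) + 1).toNat = k + 1 := by omega
  have h3 : ((k : Int)).toNat = k := by omega
  rw [h1, h2, h3]
  have hset' : (v :: r).set (k + 1) (x + 1) = v :: r.set k (x + 1) := rfl
  rw [hset', List.take_succ_cons]
  have hcnt : r.length + 1 - (k + 2) = r.length - (k + 1) := by omega
  rw [hcnt]
  rfl

theorem pvStepA_last (f v : Int) (n : Nat) (hv : (v != f) = true) :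
    pvStepA f (v :: List.replicate n f) = List.replicate (n + 1) (v + 1) := by
  have hnone : ((PySem.List.enumerate (List.replicate n f) 0).reverse).find? (fun p => p.2 != f) = none := by
    rw [List.find?_eq_none]
    intro p hp
    rw [List.mem_reverse] at hp
    obtain ⟨k, hk, hke⟩ := (PySem.List.mem_enumerate_iff _ 0 _).1 hp
    have : p.2 = f := by rw [hke]; simp
    simp [this]
  unfold pvStepA
  rw [pvFindCons, hnone, if_pos hv]
  simp only [Option.map_none, Option.none_or]
  have hset : (v :: List.replicate n f).set ((0 : Int)).toNat (v + 1) = (v + 1) :: List.replicate n f := rfl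
  have hlen : ((v :: List.replicate n f).set ((0 : Int)).toNat (v + 1)).length = n + 1 := by simp
  have hF := pvFoldSet (v + 1) (((v :: List.replicate n f).set ((0 : Int)).toNat (v + 1)).length - ((0 : Int) + 1).toNat)
      ((v :: List.replicate n f).set ((0 : Int)).toNat (v + 1)) ((0 : Int) + 1) (by omega) rfl
  simp only [hlen] at hF
  simp only [List.length_cons, List.length_replicate]
  rw [hF, hset]
  have h1 : ((0 : Int) + 1).toNat = 1 := by omega
  rw [h1]
  simp [List.replicate_succ]

theorem pvStepA_len (f : Int) (r : List Int) (hc : r.any (fun v => v != f) = true) :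
    (pvStepA f r).length = r.length := by
  obtain ⟨i, x, hi, -, -, he⟩ := pvStepA_char f r hc
  rw [he]
  simp [List.length_take]
  omega

theorem pvStepA_bound (f : Int) (r : List Int) (hc : r.any (fun v => v != f) = true)
    (hb : ∀ x ∈ r, x ≤ f) : ∀ y ∈ pvStepA f r, y ≤ f := by
  obtain ⟨i, x, hi, hget, hx, he⟩ := pvStepA_char f r hc
  have hxr : x ∈ r := List.mem_of_getElem? hget
  have hxf : x ≠ f := by simpa using hx
  have hxle : x ≤ f := hb x hxr
  intro y hy
  rw [he, List.mem_append] at hy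
  rcases hy with hy | hy
  · exact hb y (List.take_subset i r hy)
  · have := List.eq_of_mem_replicate hy
    omega

-- lifting A's loop (and its residual fuel) over a fixed head
theorem pvLift (f v : Int) : ∀ (fuel : Nat) (r : List Int), (∀ x ∈ r, x ≤ f) →
    (pvLoopA f fuel (v :: r) = (pvLoopA f fuel r).map (v :: ·) ++
      (match pvRem f fuel r with
       | none => []
       | some k => pvLoopA f k (v :: List.replicate r.length f))) ∧
    (pvRem f fuel (v :: r) =
      (match pvRem f fuel r with
       | none => none
       | some k => pvRem f k (v :: List.replicate r.length f))) := by
  intro fuel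
  induction fuel with
  | zero =>
    intro r hb
    by_cases hc : r.any (fun x => x != f) = true
    · have hR0 : pvRem f 0 r = none := by
        show (if r.any (fun v => v != f) = true then none else some 0) = none
        rw [if_pos hc]
      have hcv : (v :: r).any (fun x => x != f) = true := by
        rw [List.any_cons, hc, Bool.or_true]
      rw [hR0]
      constructor
      · rfl
      · show (if ((v :: r).any fun v => v != f) = true then none else some 0) = none
        rw [if_pos hcv]
    · have hrep : r = List.replicate r.length f := by
        apply List.eq_replicate_of_mem
        intro b hbmem
        have := List.any_eq_false.mp (Bool.eq_false_iff.mpr (fun h => hc h)) b hbmem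
        simpa using this
      have hR0 : pvRem f 0 r = some 0 := by
        show (if r.any (fun v => v != f) = true then none else some 0) = some 0
        rw [if_neg hc]
      rw [hR0]
      constructor
      · show ([] : List (List Int)) = List.map _ (pvLoopA f 0 r) ++ pvLoopA f 0 (v :: List.replicate r.length f)
        rfl
      · show pvRem f 0 (v :: r) = pvRem f 0 (v :: List.replicate r.length f)
        conv_lhs => rw [hrep]
  | succ fuel ih =>
    intro r hb
    by_cases hc : r.any (fun x => x != f) = true
    · have hcv : (v :: r).any (fun x => x != f) = true := by
        rw [List.any_cons, hc, Bool.or_true]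
      have hsb : ∀ x ∈ pvStepA f r, x ≤ f := pvStepA_bound f r hc hb
      have hsl : (pvStepA f r).length = r.length := pvStepA_len f r hc
      obtain ⟨ihL, ihR⟩ := ih (pvStepA f r) hsb
      rw [hsl] at ihL ihR
      constructor
      · show (if (v :: r).any (fun x => x != f) = true then
            (pvStepA f (v :: r)) :: pvLoopA f fuel (pvStepA f (v :: r)) else []) = _
        rw [if_pos hcv, pvStepA_cons f v r hc]
        show (v :: pvStepA f r) :: pvLoopA f fuel (v :: pvStepA f r) = _
        rw [ihL]
        show (v :: pvStepA f r) :: ((pvLoopA f fuel (pvStepA f r)).map (v :: ·) ++ _) = _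
        have hA : pvLoopA f (fuel + 1) r = (pvStepA f r) :: pvLoopA f fuel (pvStepA f r) := by
          show (if r.any (fun x => x != f) = true then
              (pvStepA f r) :: pvLoopA f fuel (pvStepA f r) else []) = _
          rw [if_pos hc]
        have hB : pvRem f (fuel + 1) r = pvRem f fuel (pvStepA f r) := by
          show (if r.any (fun x => x != f) = true then pvRem f fuel (pvStepA f r)
              else some (fuel + 1)) = _
          rw [if_pos hc]
        rw [hA, hB, List.map_cons, List.cons_append]
      · show (if (v :: r).any (fun x => x != f) = true then
            pvRem f fuel (pvStepA f (v :: r)) else some (fuel + 1)) = _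
        rw [if_pos hcv, pvStepA_cons f v r hc, ihR]
        have hB : pvRem f (fuel + 1) r = pvRem f fuel (pvStepA f r) := by
          show (if r.any (fun x => x != f) = true then pvRem f fuel (pvStepA f r)
              else some (fuel + 1)) = _
          rw [if_pos hc]
        rw [hB]
    · have hrep : r = List.replicate r.length f := by
        apply List.eq_replicate_of_mem
        intro b hbmem
        have := List.any_eq_false.mp (Bool.eq_false_iff.mpr (fun h => hc h)) b hbmem
        simpa using this
      have hA : pvLoopA f (fuel + 1) r = [] := by
        show (if r.any (fun x => x != f) = true then
            (pvStepA f r) :: pvLoopA f fuel (pvStepA f r) else []) = _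
        rw [if_neg hc]
      have hB : pvRem f (fuel + 1) r = some (fuel + 1) := by
        show (if r.any (fun x => x != f) = true then pvRem f fuel (pvStepA f r)
            else some (fuel + 1)) = _
        rw [if_neg hc]
      rw [hA, hB]
      constructor
      · conv_lhs => rw [hrep]
        simp
      · conv_lhs => rw [hrep]

-- proof-side per-die enumeration (intermediate between the two ports)
def pvGenB (num_faces : Int) : Nat → Int → List (List Int)
  | 0, _ => [[]]
  | n + 1, lo =>
      (PySem.List.pyRange lo (num_faces + 1) 1).flatMap
        (fun v => (pvGenB num_faces n v).map (fun rest => v :: rest))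

theorem pvGen_split (f : Int) (n : Nat) (lo : Int) (h : lo ≤ f) :
    pvGenB f (n + 1) lo = (pvGenB f n lo).map (lo :: ·) ++ pvGenB f (n + 1) (lo + 1) := by
  show (PySem.List.pyRange lo (f + 1) 1).flatMap _ = _
  rw [PySem.List.pyRange_one_cons (by omega), List.flatMap_cons]
  rfl

theorem pvGen_head (f : Int) : ∀ (n : Nat) (lo : Int), lo ≤ f →
    ∃ t, pvGenB f n lo = List.replicate n lo :: t := by
  intro n
  induction n with
  | zero => intro lo _; exact ⟨[], rfl⟩
  | succ n ih =>
    intro lo hlo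
    obtain ⟨t, ht⟩ := ih lo hlo
    refine ⟨(pvGenB f n lo).tail.map (lo :: ·) ++ pvGenB f (n + 1) (lo + 1), ?_⟩
    rw [pvGen_split f n lo hlo, ht]
    simp [List.replicate_succ]

theorem pvGen_len (f : Int) : ∀ (n : Nat) (lo : Int),
    (pvGenB f n lo).length ≤ (f + 1 - lo).toNat ^ n := by
  intro n
  induction n with
  | zero => intro lo; simp [pvGenB]
  | succ n ih =>
    have aux : ∀ (d : Nat) (lo : Int), (f + 1 - lo).toNat ≤ d →
        (pvGenB f (n + 1) lo).length ≤ (f + 1 - lo).toNat ^ (n + 1) := by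
      intro d
      induction d with
      | zero =>
        intro lo hd
        have hgt : f < lo := by omega
        show ((PySem.List.pyRange lo (f + 1) 1).flatMap _).length ≤ _
        rw [PySem.List.pyRange_one_eq_nil (by omega)]
        simp
      | succ d ihd =>
        intro lo hd
        by_cases hlo : lo ≤ f
        · rw [pvGen_split f n lo hlo]
          have h2 := ihd (lo + 1) (by omega)
          have h1 := ih lo
          have ha : (f + 1 - (lo + 1)).toNat = (f + 1 - lo).toNat - 1 := by omega
          have hapos : 1 ≤ (f + 1 - lo).toNat := by omega
          rw [ha] at h2
          rw [List.length_append, List.length_map]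
          set a := (f + 1 - lo).toNat with hadef
          calc (pvGenB f n lo).length + (pvGenB f (n + 1) (lo + 1)).length
              ≤ a ^ n + (a - 1) ^ (n + 1) := by omega
            _ ≤ a ^ n + (a - 1) * a ^ n := by
                have : (a - 1) ^ (n + 1) = (a - 1) ^ n * (a - 1) := by ring
                rw [this]
                have hp : (a - 1) ^ n ≤ a ^ n := Nat.pow_le_pow_left (by omega) n
                nlinarith
            _ = a ^ (n + 1) := by
                have : a ^ n + (a - 1) * a ^ n = (1 + (a - 1)) * a ^ n := by ring
                rw [this]
                have h1a : 1 + (a - 1) = a := by omega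
                rw [h1a]
                ring
        · show ((PySem.List.pyRange lo (f + 1) 1).flatMap _).length ≤ _
          rw [PySem.List.pyRange_one_eq_nil (by omega)]
          simp
    intro lo
    exact aux (f + 1 - lo).toNat lo (le_refl _)

-- the main correspondence: from the all-lo roll, A's loop reproduces B's enumeration
theorem pvMain (f : Int) : ∀ (n : Nat) (lo : Int), lo ≤ f → ∀ (fuel : Nat),
    (pvGenB f n lo).length ≤ fuel + 1 →
    (List.replicate n lo :: pvLoopA f fuel (List.replicate n lo) = pvGenB f n lo) ∧
    (pvRem f fuel (List.replicate n lo) = some (fuel + 1 - (pvGenB f n lo).length)) := by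
  intro n
  induction n with
  | zero =>
    intro lo _ fuel _
    constructor
    · cases fuel with
      | zero => rfl
      | succ fuel => simp [pvLoopA, pvGenB]
    · cases fuel with
      | zero => simp [pvRem, pvGenB]
      | succ fuel => simp [pvRem, pvGenB]
  | succ n ih =>
    have aux : ∀ (d : Nat) (lo : Int), lo ≤ f → (f - lo).toNat ≤ d → ∀ (fuel : Nat),
        (pvGenB f (n + 1) lo).length ≤ fuel + 1 →
        (List.replicate (n + 1) lo :: pvLoopA f fuel (List.replicate (n + 1) lo) = pvGenB f (n + 1) lo) ∧
        (pvRem f fuel (List.replicate (n + 1) lo) = some (fuel + 1 - (pvGenB f (n + 1) lo).length)) := by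
      intro d
      induction d with
      | zero =>
        intro lo hlo hd fuel hfuel
        -- lo = f : the enumeration is the single roll [f, …, f] and the loop stops at once
        have hlof : lo = f := by omega
        have hsplit := pvGen_split f n lo hlo
        have hnil : pvGenB f (n + 1) (lo + 1) = [] := by
          show (PySem.List.pyRange (lo + 1) (f + 1) 1).flatMap _ = []
          rw [PySem.List.pyRange_one_eq_nil (by omega)]
          rfl
        rw [hnil, List.append_nil] at hsplit
        have hbound : ∀ x ∈ List.replicate n lo, x ≤ f := by
          intro x hx; rw [List.eq_of_mem_replicate hx]; exact hlo
        have hsub := ih lo hlo fuel (by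
          rw [hsplit, List.length_map] at hfuel; omega)
        obtain ⟨hsubL, hsubR⟩ := hsub
        obtain ⟨liftL, liftR⟩ := pvLift f lo fuel (List.replicate n lo) hbound
        have hrepl : (List.replicate n lo).length = n := List.length_replicate
        have hcnil : ∀ (k : Nat), pvLoopA f k (lo :: List.replicate n f) = [] := by
          intro k
          cases k with
          | zero => rfl
          | succ k =>
            show (if (lo :: List.replicate n f).any (fun x => x != f) = true then _ else []) = []
            rw [if_neg]
            simp [hlof]
        have hcrem : ∀ (k : Nat), pvRem f k (lo :: List.replicate n f) = some k := by
          intro k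
          cases k with
          | zero =>
            show (if (lo :: List.replicate n f).any (fun x => x != f) = true then none else some 0) = _
            rw [if_neg]
            simp [hlof]
          | succ k =>
            show (if (lo :: List.replicate n f).any (fun x => x != f) = true then _ else some (k + 1)) = _
            rw [if_neg]
            simp [hlof]
        constructor
        · rw [List.replicate_succ, liftL, hrepl]
          simp only [hsubR]
          rw [hcnil, List.append_nil, hsplit]
          have : pvLoopA f fuel (List.replicate n lo) = (pvGenB f n lo).tail := by
            rw [← hsubL]; rfl
          rw [this]
          obtain ⟨t, ht⟩ := pvGen_head f n lo hlo
          rw [ht]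
          simp
        · rw [List.replicate_succ, liftR, hrepl]
          simp only [hsubR]
          rw [hcrem, hsplit, List.length_map]
      | succ d ihd =>
        intro lo hlo hd fuel hfuel
        by_cases hlof : lo = f
        · -- same as the base case
          have hlof' : lo = f := hlof
          have hsplit := pvGen_split f n lo hlo
          have hnil : pvGenB f (n + 1) (lo + 1) = [] := by
            show (PySem.List.pyRange (lo + 1) (f + 1) 1).flatMap _ = []
            rw [PySem.List.pyRange_one_eq_nil (by omega)]
            rfl
          rw [hnil, List.append_nil] at hsplit
          have hbound : ∀ x ∈ List.replicate n lo, x ≤ f := by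
            intro x hx; rw [List.eq_of_mem_replicate hx]; exact hlo
          obtain ⟨hsubL, hsubR⟩ := ih lo hlo fuel (by
            rw [hsplit, List.length_map] at hfuel; omega)
          obtain ⟨liftL, liftR⟩ := pvLift f lo fuel (List.replicate n lo) hbound
          have hrepl : (List.replicate n lo).length = n := List.length_replicate
          have hcnil : ∀ (k : Nat), pvLoopA f k (lo :: List.replicate n f) = [] := by
            intro k
            cases k with
            | zero => rfl
            | succ k =>
              show (if (lo :: List.replicate n f).any (fun x => x != f) = true then _ else []) = []
              rw [if_neg]
              simp [hlof]
          have hcrem : ∀ (k : Nat), pvRem f k (lo :: List.replicate n f) = some k := by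
            intro k
            cases k with
            | zero =>
              show (if (lo :: List.replicate n f).any (fun x => x != f) = true then none else some 0) = _
              rw [if_neg]
              simp [hlof]
            | succ k =>
              show (if (lo :: List.replicate n f).any (fun x => x != f) = true then _ else some (k + 1)) = _
              rw [if_neg]
              simp [hlof]
          constructor
          · rw [List.replicate_succ, liftL, hrepl]
            simp only [hsubR]
            rw [hcnil, List.append_nil, hsplit]
            have : pvLoopA f fuel (List.replicate n lo) = (pvGenB f n lo).tail := by
              rw [← hsubL]; rfl
            rw [this]
            obtain ⟨t, ht⟩ := pvGen_head f n lo hlo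
            rw [ht]
            simp
          · rw [List.replicate_succ, liftR, hrepl]
            simp only [hsubR]
            rw [hcrem, hsplit, List.length_map]
        · -- lo < f : one sub-block for head lo, then the chain restarts at lo+1
          have hlt : lo < f := lt_of_le_of_ne hlo hlof
          have hsplit := pvGen_split f n lo hlo
          have hbound : ∀ x ∈ List.replicate n lo, x ≤ f := by
            intro x hx; rw [List.eq_of_mem_replicate hx]; exact hlo
          -- sizes
          obtain ⟨t1, ht1⟩ := pvGen_head f n lo hlo
          obtain ⟨t2, ht2⟩ := pvGen_head f (n + 1) (lo + 1) (by omega)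
          have hL1 : 1 ≤ (pvGenB f n lo).length := by rw [ht1]; simp
          have hL2 : 1 ≤ (pvGenB f (n + 1) (lo + 1)).length := by rw [ht2]; simp
          have hTot : (pvGenB f (n + 1) lo).length
              = (pvGenB f n lo).length + (pvGenB f (n + 1) (lo + 1)).length := by
            rw [hsplit]; simp
          obtain ⟨hsubL, hsubR⟩ := ih lo hlo fuel (by omega)
          obtain ⟨liftL, liftR⟩ := pvLift f lo fuel (List.replicate n lo) hbound
          have hrepl : (List.replicate n lo).length = n := List.length_replicate
          -- residual fuel after the lo-headed block
          set k := fuel + 1 - (pvGenB f n lo).length with hkdef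
          have hk1 : 1 ≤ k := by omega
          have hcv : ((lo :: List.replicate n f).any (fun x => x != f)) = true := by
            rw [List.any_cons]
            have : (lo != f) = true := by simpa using hlof
            rw [this, Bool.true_or]
          have hstep : pvStepA f (lo :: List.replicate n f) = List.replicate (n + 1) (lo + 1) :=
            pvStepA_last f lo n (by simpa using hlof)
          obtain ⟨hrecL, hrecR⟩ := ihd (lo + 1) (by omega) (by omega) (k - 1) (by omega)
          have hloop : pvLoopA f k (lo :: List.replicate n f)
              = List.replicate (n + 1) (lo + 1) :: pvLoopA f (k - 1) (List.replicate (n + 1) (lo + 1)) := by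
            have hk : k = (k - 1) + 1 := by omega
            rw [hk]
            show (if (lo :: List.replicate n f).any (fun x => x != f) = true then
                (pvStepA f (lo :: List.replicate n f)) ::
                  pvLoopA f (k - 1) (pvStepA f (lo :: List.replicate n f)) else []) = _
            rw [if_pos hcv, hstep]
            simp
          have hrem : pvRem f k (lo :: List.replicate n f)
              = pvRem f (k - 1) (List.replicate (n + 1) (lo + 1)) := by
            have hk : k = (k - 1) + 1 := by omega
            rw [hk]
            show (if (lo :: List.replicate n f).any (fun x => x != f) = true then
                pvRem f (k - 1) (pvStepA f (lo :: List.replicate n f)) else some ((k - 1) + 1)) = _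
            rw [if_pos hcv, hstep]
            simp
          constructor
          · rw [List.replicate_succ, liftL, hrepl]
            simp only [hsubR]
            rw [hloop, hrecL, hsplit]
            have htail : pvLoopA f fuel (List.replicate n lo) = (pvGenB f n lo).tail := by
              rw [← hsubL]; rfl
            rw [htail, ht1]
            simp
          · rw [List.replicate_succ, liftR, hrepl]
            simp only [hsubR]
            rw [hrem, hrecR]
            congr 1
            omega
    intro lo hlo fuel hfuel
    exact aux (f - lo).toNat lo hlo (le_refl _) fuel hfuel

theorem pvGenB2_succ (f lo : Int) (m : Nat) :
    pvGenB2 f lo (m + 1) = (PySem.List.pyRange lo (f + 1) 1).flatMap (fun v =>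
      (PySem.List.pyRange ((m : Int) + 1) 0 (-1)).flatMap (fun k =>
        (pvGenB2 f (v + 1) (m + 1 - k.toNat)).map (fun rest => List.replicate k.toNat v ++ rest))) := by
  rw [pvGenB2]
  congr 1
  funext v
  conv_rhs => rw [← List.attach_map_subtype_val (PySem.List.pyRange ((m : Int) + 1) 0 (-1))]
  rw [List.flatMap_map]

-- the k-loop for a fixed face lo (run lengths k = m+1, …, 1)
def pvBlock (f lo : Int) (m : Nat) : List (List Int) :=
  (PySem.List.pyRange ((m : Int) + 1) 0 (-1)).flatMap (fun k =>
    (pvGenB2 f (lo + 1) (m + 1 - k.toNat)).map (fun rest => List.replicate k.toNat lo ++ rest))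

theorem pvGenB2_split (f lo : Int) (m : Nat) (h : lo ≤ f) :
    pvGenB2 f lo (m + 1) = pvBlock f lo m ++ pvGenB2 f (lo + 1) (m + 1) := by
  rw [pvGenB2_succ, PySem.List.pyRange_one_cons (by omega : lo < f + 1), List.flatMap_cons,
    pvGenB2_succ]
  rfl

theorem pvGenB2_nil (f lo : Int) (m : Nat) (h : f < lo) : pvGenB2 f lo (m + 1) = [] := by
  rw [pvGenB2_succ, PySem.List.pyRange_one_eq_nil (by omega : f + 1 ≤ lo)]
  rfl

theorem pvCountdown_split (n : Nat) :
    PySem.List.pyRange ((n : Int) + 1 + 1) 0 (-1)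
      = (PySem.List.pyRange ((n : Int) + 1) 0 (-1)).map (fun x => x + 1) ++ [1] := by
  rw [PySem.List.pyRange_neg_one, PySem.List.pyRange_neg_one]
  have h1 : (((n : Int) + 1 + 1) - 0).toNat = n + 2 := by omega
  have h2 : (((n : Int) + 1) - 0).toNat = n + 1 := by omega
  rw [h1, h2, List.range_succ, List.map_append, List.map_map]
  congr 1
  · apply List.map_congr_left
    intro k hk
    simp only [Function.comp_apply]
    ring
  · simp

theorem pvBlock_eq (f : Int) (n : Nat) (lo : Int) (h : lo ≤ f) :
    pvBlock f lo n = (pvGenB2 f lo n).map (lo :: ·) := by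
  cases n with
  | zero =>
    show (PySem.List.pyRange ((0 : Int) + 1) 0 (-1)).flatMap _ = _
    rw [PySem.List.pyRange_neg_one_cons (by omega), PySem.List.pyRange_neg_one_eq_nil (by omega)]
    simp [pvGenB2]
  | succ n =>
    show (PySem.List.pyRange ((n : Int) + 1 + 1) 0 (-1)).flatMap _ = _
    rw [pvCountdown_split, List.flatMap_append, List.flatMap_map]
    have hcongr : ∀ k ∈ PySem.List.pyRange ((n : Int) + 1) 0 (-1),
        (pvGenB2 f (lo + 1) (n + 1 + 1 - (k + 1).toNat)).map
            (fun rest => List.replicate (k + 1).toNat lo ++ rest)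
          = ((pvGenB2 f (lo + 1) (n + 1 - k.toNat)).map
              (fun rest => List.replicate k.toNat lo ++ rest)).map (lo :: ·) := by
      intro k hk
      have hm := PySem.List.mem_pyRange_neg_one.mp hk
      have ht : (k + 1).toNat = k.toNat + 1 := by omega
      rw [ht]
      have hs : n + 1 + 1 - (k.toNat + 1) = n + 1 - k.toNat := by omega
      rw [hs, List.map_map]
      apply List.map_congr_left
      intro rest _
      simp [List.replicate_succ]
    rw [List.flatMap_congr hcongr]
    have hfm : (PySem.List.pyRange ((n : Int) + 1) 0 (-1)).flatMap
          (fun k => ((pvGenB2 f (lo + 1) (n + 1 - k.toNat)).map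
              (fun rest => List.replicate k.toNat lo ++ rest)).map (lo :: ·))
        = (pvBlock f lo n).map (lo :: ·) := by
      rw [pvBlock, List.map_flatMap]
    rw [hfm, pvGenB2_split f lo n h, List.map_append]
    congr 1
    show (pvGenB2 f (lo + 1) (n + 1)).map (fun rest => List.replicate (1 : Int).toNat lo ++ rest)
          ++ [] = _
    rw [List.append_nil]
    apply List.map_congr_left
    intro rest _
    rfl

theorem pvGenB2_eq (f : Int) : ∀ (n : Nat) (lo : Int), pvGenB2 f lo n = pvGenB f n lo := by
  intro n
  induction n with
  | zero => intro lo; rw [pvGenB2]; rfl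
  | succ n ihn =>
    have aux : ∀ (d : Nat) (lo : Int), (f + 1 - lo).toNat ≤ d →
        pvGenB2 f lo (n + 1) = pvGenB f (n + 1) lo := by
      intro d
      induction d with
      | zero =>
        intro lo hd
        rw [pvGenB2_nil f lo n (by omega)]
        show ([] : List (List Int)) = (PySem.List.pyRange lo (f + 1) 1).flatMap _
        rw [PySem.List.pyRange_one_eq_nil (by omega)]
        rfl
      | succ d ihd =>
        intro lo hd
        by_cases hlo : lo ≤ f
        · rw [pvGenB2_split f lo n hlo, pvBlock_eq f n lo hlo, ihn lo,
            ihd (lo + 1) (by omega), pvGen_split f n lo hlo]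
        · rw [pvGenB2_nil f lo n (by omega)]
          show ([] : List (List Int)) = (PySem.List.pyRange lo (f + 1) 1).flatMap _
          rw [PySem.List.pyRange_one_eq_nil (by omega)]
          rfl
    intro lo
    exact aux (f + 1 - lo).toNat lo (le_refl _)

-- ===== VERDICT (by name: the statement is the Claim_ definition above) =====
theorem iter_possible_rolls_spec : Claim_equal_iter_possible_rolls := by
  intro nd f _ hpre
  unfold Spec_iter_possible_rolls iter_possible_rolls iter_possible_rolls_alt
  rw [pvGenB2_eq f nd.toNat 1]
  by_cases h0 : nd = 0
  · subst h0; simp [pvGenB]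
  · simp only [beq_iff_eq, h0, if_false]
    by_cases hpos : 0 < nd
    · have hf : 1 ≤ f := hpre hpos
      have hlen : (pvGenB f nd.toNat 1).length ≤ (f.toNat + 1) ^ nd.toNat := by
        calc (pvGenB f nd.toNat 1).length ≤ (f + 1 - 1).toNat ^ nd.toNat := pvGen_len f nd.toNat 1
          _ ≤ (f.toNat + 1) ^ nd.toNat := by
              apply Nat.pow_le_pow_left; omega
      exact (pvMain f nd.toNat 1 hf ((f.toNat + 1) ^ nd.toNat) (by omega)).1
    · have : nd.toNat = 0 := by omega
      rw [this]
      simp [pvGenB, pvLoopA]
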